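-- pv_equiv track=rewrite | github.com/dloadingskinny/FPOO195 | listas y tuplas/ejercicio2.py | reemplazar_repetidos_con_cero
-- ===== SOURCE A (Python) =====
-- def reemplazar_repetidos_con_cero(lista):
--     numeros_unicos = set()
--     nueva_lista = []
--     for num in lista:
--         if num not in numeros_unicos:
--             numeros_unicos.add(num)
--             nueva_lista.append(num)
--         else:
--             nueva_lista.append(0)
--     return nueva_lista
-- ===== SOURCE B (Python) =====
-- def reemplazar_repetidos_con_cero(lista):
--     first_index = {}
--     for i, num in enumerate(lista):
--         if num not in first_index:
--             first_index[num] = i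
--     return [num if first_index[num] == i else 0 for i, num in enumerate(lista)]
-- ===== Notes on version B (the rewrite author's own statement) =====
-- stated objective: alternative
-- what changed: B first builds a first-occurrence index table over enumerate(lista) and then emits the result in a separate comprehension comparing each position with the table, instead of A's single pass that decides inline while maintaining a seen-set and growing accumulator.
import Mathlib
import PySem

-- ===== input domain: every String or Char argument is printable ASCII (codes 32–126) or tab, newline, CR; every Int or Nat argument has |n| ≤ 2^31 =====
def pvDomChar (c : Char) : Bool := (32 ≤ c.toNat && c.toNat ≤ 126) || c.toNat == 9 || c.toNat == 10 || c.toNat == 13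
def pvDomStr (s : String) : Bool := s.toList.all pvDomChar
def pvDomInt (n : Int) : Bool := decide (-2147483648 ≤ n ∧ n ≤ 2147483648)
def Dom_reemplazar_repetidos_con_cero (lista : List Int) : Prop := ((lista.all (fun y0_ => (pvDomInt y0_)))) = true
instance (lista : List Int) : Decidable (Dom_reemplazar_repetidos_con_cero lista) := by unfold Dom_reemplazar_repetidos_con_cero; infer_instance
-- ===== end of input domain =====

-- B replaces A's inline seen-set loop by a first-occurrence index table built in a
-- first pass and a second emission pass comparing each position with the table.

-- ===== PORT A =====
-- A: one pass keeping a seen-set and appending num or 0 inline.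
def reemplazar_repetidos_con_cero (lista : List Int) : List Int :=
  (lista.foldl
    (fun (st : PySem.Set Int × List Int) num =>
      if ¬ (PySem.Set.contains st.1 num) then
        (PySem.Set.add st.1 num, st.2 ++ [num])
      else
        (st.1, st.2 ++ [0]))
    (PySem.Set.empty, [])).2

-- ===== PORT B =====
-- B: pass 1 builds first_index : value ↦ index of first occurrence; pass 2 emits.
def reemplazar_repetidos_con_cero_alt (lista : List Int) : List Int :=
  let first_index : PySem.Dict Int Int :=
    (PySem.List.enumerate lista).foldl
      (fun d p => if ¬ (d.contains p.2) then d.insert p.2 p.1 else d)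
      PySem.Dict.empty
  (PySem.List.enumerate lista).map
    (fun p => if first_index.getD p.2 (-1) == p.1 then p.2 else 0)

-- ===== PRECONDITION & SPEC =====
def Spec_reemplazar_repetidos_con_cero (lista : List Int) (out : List Int) : Prop := out = reemplazar_repetidos_con_cero_alt lista
instance (lista : List Int) (out : List Int) : Decidable (Spec_reemplazar_repetidos_con_cero lista out) := by unfold Spec_reemplazar_repetidos_con_cero; infer_instance

-- ===== CLAIM (what is proved, stated in full; the proofs are below) =====
def Claim_equal_reemplazar_repetidos_con_cero : Prop := ∀ (lista : List Int), Dom_reemplazar_repetidos_con_cero lista → Spec_reemplazar_repetidos_con_cero lista (reemplazar_repetidos_con_cero lista)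

-- ===== LEMMAS AND PROOFS =====

-- canonical form: element i of the output is 0 iff it already occurred in the prefix
def canonAux : List Int → List Int → List Int
  | _, [] => []
  | pref, x :: xs => (if x ∈ pref then 0 else x) :: canonAux (pref ++ [x]) xs

lemma A_loop (ys : List Int) : ∀ (pref acc : List Int),
    (ys.foldl
      (fun (st : PySem.Set Int × List Int) num =>
        if ¬ (PySem.Set.contains st.1 num) then
          (PySem.Set.add st.1 num, st.2 ++ [num])
        else
          (st.1, st.2 ++ [0]))
      (PySem.Set.ofList pref, acc)).2 = acc ++ canonAux pref ys := by
  induction ys with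
  | nil => intro pref acc; simp [canonAux]
  | cons x ys ih =>
    intro pref acc
    have hadd : PySem.Set.add (PySem.Set.ofList pref) x = PySem.Set.ofList (pref ++ [x]) := by
      simp [PySem.Set.ofList_eq_foldl, List.foldl_append]
    by_cases hx : x ∈ pref
    · have hc : PySem.Set.contains (PySem.Set.ofList pref) x = true := by
        simp only [PySem.Set.contains_iff, PySem.Set.mem_ofList]; exact hx
      have hsame : PySem.Set.ofList pref = PySem.Set.ofList (pref ++ [x]) := by
        rw [← hadd, PySem.Set.add, hc]; simp
      rw [List.foldl_cons, if_neg (by rw [hc]; simp), hsame, ih (pref ++ [x]) (acc ++ [0])]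
      simp [canonAux, hx]
    · have hc : PySem.Set.contains (PySem.Set.ofList pref) x = false := by
        simp only [Bool.eq_false_iff, ne_eq, PySem.Set.contains_iff, PySem.Set.mem_ofList]
        exact hx
      rw [List.foldl_cons, if_pos (by rw [hc]; simp), hadd, ih (pref ++ [x]) (acc ++ [x])]
      simp [canonAux, hx]

lemma A_eq_canon (lista : List Int) : reemplazar_repetidos_con_cero lista = canonAux [] lista := by
  have := A_loop lista [] []
  simpa [reemplazar_repetidos_con_cero, PySem.Set.empty] using this

-- characterisation of the first-pass dictionary
lemma fi_loop (ys : List Int) : ∀ (s : Int) (d : PySem.Dict Int Int) (x : Int),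
    ((PySem.List.enumerate ys s).foldl
      (fun d p => if ¬ (d.contains p.2) then d.insert p.2 p.1 else d) d).get? x =
      if d.contains x then d.get? x
      else (PySem.List.index? ys x).map (fun k => s + (k : Int)) := by
  induction ys with
  | nil =>
    intro s d x
    by_cases h : d.contains x = true
    · simp [PySem.List.enumerate_nil, h]
    · simp [PySem.List.enumerate_nil, h, PySem.Dict.get?_eq_none_iff_contains]
  | cons y ys ih =>
    intro s d x
    rw [PySem.List.enumerate_cons, List.foldl_cons]
    by_cases hy : d.contains y = true
    · rw [if_neg (fun h => by rw [hy] at h; exact h rfl), ih (s + 1) d x]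
      by_cases hx : d.contains x = true
      · simp [hx]
      · have hne : y ≠ x := fun he => by rw [← he] at hx; exact hx hy
        rw [PySem.List.index?_cons_of_ne _ hne]
        simp only [hx, Bool.false_eq_true, if_false]
        cases PySem.List.index? ys x
        · simp
        · simp; omega
    · rw [if_pos hy, ih (s + 1) (d.insert y s) x]
      by_cases hxy : x = y
      · subst hxy
        rw [if_pos (by simp [PySem.Dict.contains_insert_self]), PySem.Dict.get?_insert_self,
          if_neg hy, PySem.List.index?_cons_self]
        simp
      · have hci : (d.insert y s).contains x = d.contains x := by
          simp [PySem.Dict.contains_insert, hxy]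
        have hgi : (d.insert y s).get? x = d.get? x :=
          PySem.Dict.get?_insert_of_ne _ _ hxy
        rw [hci, hgi, PySem.List.index?_cons_of_ne _ (Ne.symm hxy)]
        by_cases hx : d.contains x = true
        · simp [hx]
        · simp only [hx, Bool.false_eq_true, if_false]
          cases PySem.List.index? ys x
          · simp
          · simp; omega

lemma index?_append_left (l₁ l₂ : List Int) (x : Int) (hx : x ∈ l₁) :
    PySem.List.index? (l₁ ++ l₂) x = PySem.List.index? l₁ x := by
  induction l₁ with
  | nil => cases hx
  | cons a l₁ ih =>
    by_cases hax : a = x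
    · subst hax
      rw [List.cons_append, PySem.List.index?_cons_self, PySem.List.index?_cons_self]
    · have hx' : x ∈ l₁ := by cases hx with | head => exact absurd rfl hax | tail _ h => exact h
      rw [List.cons_append, PySem.List.index?_cons_of_ne _ hax,
        PySem.List.index?_cons_of_ne _ hax, ih hx']

lemma index?_append_right (l₁ l₂ : List Int) (x : Int) (hx : x ∉ l₁) :
    PySem.List.index? (l₁ ++ l₂) x = (PySem.List.index? l₂ x).map (· + l₁.length) := by
  induction l₁ with
  | nil => simp
  | cons a l₁ ih =>
    have hax : a ≠ x := fun h => hx (h ▸ List.mem_cons_self)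
    rw [List.cons_append, PySem.List.index?_cons_of_ne _ hax,
      ih (fun h => hx (List.mem_cons_of_mem _ h))]
    simp [Option.map_map]

lemma index?_lt_length (l : List Int) (x : Int) (k : Nat)
    (h : PySem.List.index? l x = some k) : k < l.length := by
  rw [PySem.List.index?_eq_some_iff] at h
  obtain ⟨pre, suf, hl, hk, -⟩ := h
  subst hl hk; simp

lemma B_map (ys : List Int) : ∀ (pref : List Int) (g : Int → Int),
    (∀ x, x ∈ pref ++ ys →
      g x = ((PySem.List.index? (pref ++ ys) x).map (fun k => (k : Int))).getD (-1)) →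
    (PySem.List.enumerate ys (pref.length : Int)).map
      (fun p => if g p.2 == p.1 then p.2 else 0) = canonAux pref ys := by
  induction ys with
  | nil => intro pref g _; simp [PySem.List.enumerate_nil, canonAux]
  | cons x ys ih =>
    intro pref g hg
    rw [PySem.List.enumerate_cons, List.map_cons]
    have hmem : x ∈ pref ++ x :: ys := by simp
    have hgx := hg x hmem
    have htail :
        (PySem.List.enumerate ys ((pref.length : Int) + 1)).map
          (fun p => if g p.2 == p.1 then p.2 else 0) = canonAux (pref ++ [x]) ys := by
      have hlen : ((pref ++ [x]).length : Int) = (pref.length : Int) + 1 := by simp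
      have := ih (pref ++ [x]) g (by
        intro z hz
        rw [List.append_assoc, List.singleton_append]
        exact hg z (by rwa [List.append_assoc, List.singleton_append] at hz))
      rwa [hlen] at this
    rw [htail]
    by_cases hx : x ∈ pref
    · rw [index?_append_left _ _ _ hx] at hgx
      obtain ⟨k, hk⟩ := Option.isSome_iff_exists.mp ((PySem.List.index?_isSome_iff _ _).mpr hx)
      have hklt := index?_lt_length _ _ _ hk
      rw [hk] at hgx
      simp at hgx
      have hne : ¬ (g x == (pref.length : Int)) = true := by
        rw [hgx]; simp only [beq_iff_eq]; intro h; omega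
      rw [if_neg hne]
      simp [canonAux, hx]
    · rw [index?_append_right _ _ _ hx, PySem.List.index?_cons_self] at hgx
      simp at hgx
      rw [if_pos (by simp [hgx])]
      simp [canonAux, hx]

lemma B_eq_canon (lista : List Int) : reemplazar_repetidos_con_cero_alt lista = canonAux [] lista := by
  have hg : ∀ x, x ∈ ([] : List Int) ++ lista →
      (((PySem.List.enumerate lista).foldl
        (fun d p => if ¬ (d.contains p.2) then d.insert p.2 p.1 else d)
        PySem.Dict.empty).getD x (-1)) =
      ((PySem.List.index? (([] : List Int) ++ lista) x).map (fun k => (k : Int))).getD (-1) := by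
    intro x _
    rw [PySem.Dict.getD_eq_get?_getD, fi_loop lista 0 PySem.Dict.empty x]
    simp only [PySem.Dict.contains_empty, Bool.false_eq_true, if_false, List.nil_append]
    cases PySem.List.index? lista x <;> simp
  have h := B_map lista [] _ hg
  simp only [List.length_nil, Nat.cast_zero] at h
  exact h

-- ===== VERDICT (by name: the statement is the Claim_ definition above) =====
theorem reemplazar_repetidos_con_cero_spec : Claim_equal_reemplazar_repetidos_con_cero := by
  intro lista _
  unfold Spec_reemplazar_repetidos_con_cero
  rw [A_eq_canon, B_eq_canon]
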